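-- pv_equiv track=rewrite | github.com/pypi-data/pypi-mirror-198 | packages/grocery-list/grocery_list-0.0.1-py3-none-any.whl/grocery-list/__init__.py | add_ingredient
-- ===== SOURCE A (Python) =====
-- ingredients = {
--     'bakery': [
--         'bread',
--         ],
--
--     'tins': [
--         'baked beans',
--         ],
--
--     'dairy': [
--         'butter',
--         ],
--     }
--
-- recipes = {
--     'beans on toast': [
--         'bread',
--         'baked beans',
--         'butter',
--         ],
--     }
--
-- def find_ingredient(ingredient):
--
--     for place in ingredients:
--         if ingredient in ingredients[place]:
--             return place
--     raise ValueError(f'Ingredient not found: {ingredient}')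
--
-- def add_ingredient(item, groceries):
--
--     if item in recipes:
--         for ingredient in recipes[item]:
--             groceries = add_ingredient(ingredient, groceries)
--     else:
--         place = find_ingredient(item)
--         if place not in groceries:
--             groceries[place] = []
--         if item not in groceries[place]:
--             groceries[place].append(item)
--
--     return groceries
-- ===== SOURCE B (Python) =====
-- ingredients = {
--     'bakery': [
--         'bread',
--         ],
--
--     'tins': [
--         'baked beans',
--         ],
--
--     'dairy': [
--         'butter',
--         ],
--     }
--
-- recipes = {
--     'beans on toast': [
--         'bread',
--         'baked beans',
--         'butter',
--         ],
--     }
--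
-- # inverted index built once: base ingredient -> store section
-- PLACE_OF = {ing: place for place, lst in ingredients.items() for ing in lst}
--
-- def _expand(item):
--     # phase 1: flatten the item to its list of base ingredients (pre-order)
--     if item in recipes:
--         return [base for ing in recipes[item] for base in _expand(ing)]
--     return [item]
--
-- def add_ingredient(item, groceries):
--     # phase 2: group the flat list into groceries using the inverted index
--     for entry in _expand(item):
--         if entry not in PLACE_OF:
--             raise ValueError(f'Ingredient not found: {entry}')
--         bucket = groceries.setdefault(PLACE_OF[entry], [])
--         if entry not in bucket:
--             bucket.append(entry)
--     return groceries
-- ===== Notes on version B (the rewrite author's own statement) =====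
-- stated objective: alternative
-- what changed: B splits the work into two staged passes -- first flatten the item into its list of base ingredients, then a single grouping loop that looks each one up in an inverted ingredient-to-section index built once -- instead of A's interleaved recursion that scans the sections dict per ingredient.
import Mathlib
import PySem

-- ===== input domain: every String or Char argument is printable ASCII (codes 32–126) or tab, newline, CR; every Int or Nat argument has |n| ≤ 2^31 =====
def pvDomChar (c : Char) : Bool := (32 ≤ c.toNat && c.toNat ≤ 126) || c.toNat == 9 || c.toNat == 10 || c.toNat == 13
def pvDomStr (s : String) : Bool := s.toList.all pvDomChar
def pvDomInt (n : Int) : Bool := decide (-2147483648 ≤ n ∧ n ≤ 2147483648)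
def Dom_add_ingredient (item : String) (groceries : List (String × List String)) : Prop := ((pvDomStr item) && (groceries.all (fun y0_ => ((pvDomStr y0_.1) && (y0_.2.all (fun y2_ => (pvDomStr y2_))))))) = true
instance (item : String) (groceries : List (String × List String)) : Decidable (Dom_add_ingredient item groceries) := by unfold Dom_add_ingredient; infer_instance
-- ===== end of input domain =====

-- B replaces A's interleaved recursion by two staged passes (flatten, then group via an
-- inverted ingredient→section index built once): an alternative decomposition, same cost;
-- both Pythons mutate the groceries dict in place identically — the theorems are about the returned dict.

-- module-level constants shared by both Pythons
def pyIngredients : PySem.Dict String (List String) :=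
  PySem.Dict.ofList [("bakery", ["bread"]), ("tins", ["baked beans"]), ("dairy", ["butter"])]

def pyRecipes : PySem.Dict String (List String) :=
  PySem.Dict.ofList [("beans on toast", ["bread", "baked beans", "butter"])]

-- ===== PORT A =====
-- port of find_ingredient; none = the ValueError raise (excluded by Pre_)
def find_ingredient? (ingredient : String) : Option String :=
  (PySem.Dict.keys pyIngredients).findSome?
    (fun place => if ingredient ∈ PySem.Dict.getD pyIngredients place [] then some place else none)

-- fuel only makes the recursion total: recipes contain only base ingredients, so depth ≤ 2
def add_ingredient_go (fuel : Nat) (item : String) (g : PySem.Dict String (List String)) :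
    PySem.Dict String (List String) :=
  match fuel with
  | 0 => g
  | fuel + 1 =>
    if PySem.Dict.contains pyRecipes item then
      (PySem.Dict.getD pyRecipes item []).foldl (fun acc ing => add_ingredient_go fuel ing acc) g
    else
      match find_ingredient? item with
      | none => g  -- Python raises ValueError here; excluded by Pre_
      | some place =>
        let g1 := if PySem.Dict.contains g place then g else PySem.Dict.insert g place []
        let cur := PySem.Dict.getD g1 place []
        if item ∈ cur then g1 else PySem.Dict.insert g1 place (cur ++ [item])

def add_ingredient (item : String) (groceries : List (String × List String)) : List (String × List String) :=
  (add_ingredient_go 2 item (PySem.Dict.mk groceries)).items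

-- ===== PORT B =====
-- PLACE_OF: the dict comprehension inverting 'ingredients'
def placeOf : PySem.Dict String String :=
  PySem.Dict.ofList
    ((pyIngredients.items).flatMap (fun pl => pl.2.map (fun ing => (ing, pl.1))))

-- _expand: phase 1 flattening; fuel only makes the recursion total (depth ≤ 2 on this data)
def pvExpand (fuel : Nat) (item : String) : List String :=
  match fuel with
  | 0 => []
  | fuel + 1 =>
    if PySem.Dict.contains pyRecipes item then
      (PySem.Dict.getD pyRecipes item []).flatMap (fun ing => pvExpand fuel ing)
    else [item]

-- phase 2: one grouping fold over the flat list
def pvGroupStep (g : PySem.Dict String (List String)) (entry : String) :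
    PySem.Dict String (List String) :=
  match PySem.Dict.get? placeOf entry with
  | none => g  -- Python raises ValueError here; excluded by Pre_
  | some place =>
    let bucket := PySem.Dict.getD g place []
    let g1 := PySem.Dict.setdefault g place []
    if entry ∈ bucket then g1 else PySem.Dict.insert g1 place (bucket ++ [entry])

def add_ingredient_alt (item : String) (groceries : List (String × List String)) : List (String × List String) :=
  ((pvExpand 2 item).foldl pvGroupStep (PySem.Dict.mk groceries)).items

-- ===== PRECONDITION & SPEC =====
-- Pre_ excludes exactly the unknown items, on which the Python A (and B) raise ValueError.
def Pre_add_ingredient (item : String) (groceries : List (String × List String)) : Prop :=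
  item ∈ (["beans on toast", "bread", "baked beans", "butter"] : List String)
instance (item : String) (groceries : List (String × List String)) : Decidable (Pre_add_ingredient item groceries) := by
  unfold Pre_add_ingredient; infer_instance

def pvWitness_add_ingredient : String × (List (String × List String)) := ("beans on toast", [("tins", ["soup"])])

def Spec_add_ingredient (item : String) (groceries : List (String × List String)) (out : List (String × List String)) : Prop := out = add_ingredient_alt item groceries
instance (item : String) (groceries : List (String × List String)) (out : List (String × List String)) : Decidable (Spec_add_ingredient item groceries out) := by unfold Spec_add_ingredient; infer_instance

-- ===== CLAIM =====
def Claim_equal_add_ingredient : Prop := ∀ (item : String) (groceries : List (String × List String)), Dom_add_ingredient item groceries → Pre_add_ingredient item groceries → Spec_add_ingredient item groceries (add_ingredient item groceries)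

-- ===== LEMMAS AND PROOFS =====

-- one base-ingredient step of A equals B's grouping step, whenever both lookups agree
lemma goA_base (fuel : Nat) (entry place : String) (d : PySem.Dict String (List String))
    (h1 : PySem.Dict.contains pyRecipes entry = false) (h2 : find_ingredient? entry = some place)
    (h3 : PySem.Dict.get? placeOf entry = some place) :
    add_ingredient_go (fuel + 1) entry d = pvGroupStep d entry := by
  by_cases h : PySem.Dict.contains d place = true
  · simp [add_ingredient_go, h1, h2, pvGroupStep, h3, h,
      PySem.Dict.setdefault_of_contains d ([] : List String) h]
  · have h' : PySem.Dict.contains d place = false := by simpa using h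
    simp [add_ingredient_go, h1, h2, pvGroupStep, h3, h',
      PySem.Dict.setdefault_of_not_contains d ([] : List String) h',
      PySem.Dict.getD_insert_self, PySem.Dict.getD_of_not_contains d ([] : List String) h']

-- ===== VERDICT =====
theorem add_ingredient_spec : Claim_equal_add_ingredient := by
  intro item groceries _ hpre
  unfold Spec_add_ingredient add_ingredient add_ingredient_alt
  set d := PySem.Dict.mk groceries with hd
  have hb : PySem.Dict.contains pyRecipes "bread" = false := by decide
  have hbb : PySem.Dict.contains pyRecipes "baked beans" = false := by decide
  have hbu : PySem.Dict.contains pyRecipes "butter" = false := by decide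
  have fb : find_ingredient? "bread" = some "bakery" := by decide
  have fbb : find_ingredient? "baked beans" = some "tins" := by decide
  have fbu : find_ingredient? "butter" = some "dairy" := by decide
  have pb : PySem.Dict.get? placeOf "bread" = some "bakery" := by decide
  have pbb : PySem.Dict.get? placeOf "baked beans" = some "tins" := by decide
  have pbu : PySem.Dict.get? placeOf "butter" = some "dairy" := by decide
  unfold Pre_add_ingredient at hpre
  simp only [List.mem_cons, List.not_mem_nil, or_false] at hpre
  rcases hpre with h | h | h | h
  · subst h
    have hr : PySem.Dict.contains pyRecipes "beans on toast" = true := by decide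
    have he : pvExpand 2 "beans on toast" = ["bread", "baked beans", "butter"] := by decide
    have hg : PySem.Dict.getD pyRecipes "beans on toast" [] = ["bread", "baked beans", "butter"] := by decide
    rw [show (2 : Nat) = 1 + 1 from rfl, add_ingredient_go]
    simp only [hr, if_true, hg, List.foldl, he]
    rw [goA_base 0 _ _ d hb fb pb, goA_base 0 _ _ _ hbb fbb pbb, goA_base 0 _ _ _ hbu fbu pbu]
  · subst h
    have he : pvExpand 2 "bread" = ["bread"] := by decide
    rw [he, show (2 : Nat) = 1 + 1 from rfl, goA_base 1 _ _ d hb fb pb]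
    rfl
  · subst h
    have he : pvExpand 2 "baked beans" = ["baked beans"] := by decide
    rw [he, show (2 : Nat) = 1 + 1 from rfl, goA_base 1 _ _ d hbb fbb pbb]
    rfl
  · subst h
    have he : pvExpand 2 "butter" = ["butter"] := by decide
    rw [he, show (2 : Nat) = 1 + 1 from rfl, goA_base 1 _ _ d hbu fbu pbu]
    rfl
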